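-- pv_equiv track=rewrite | github.com/yofn/pyacm | codeforces/math数学/1100/733B阅兵式.py | f
-- ===== SOURCE A (Python) =====
-- def f(l):
--     ab = lambda x: x if x>0 else -x
--     k  = len(l)
--     dl = [c[0]-c[1] for c in l]
--     ss = sum(dl)
--     mb = ab(ss)
--     mi = 0
--     for i in range(k):
--         b = ab(ss-(dl[i]<<1))
--         if b>mb:
--             mi = i+1
--             mb = b
--     return mi
-- ===== SOURCE B (Python) =====
-- def f(l):
--     # Convexity-based algorithm: d |-> abs(ss - 2*d) is convex, so its maximum
--     # over the candidate differences ds = [0] + dl is attained at min(ds) or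
--     # max(ds).  Compute that optimal value from the two extremes alone, then
--     # find the first candidate index attaining it (earliest-wins tie-breaking).
--     dl = [c[0] - c[1] for c in l]
--     ss = sum(dl)
--     ds = [0] + dl
--     v = max(abs(ss - (min(ds) << 1)), abs(ss - (max(ds) << 1)))
--     return next(i for i, d in enumerate(ds) if abs(ss - (d << 1)) == v)
-- ===== Notes on version B (the rewrite author's own statement) =====
-- stated objective: alternative
-- what changed: Replaces the running best/index loop over all candidate values by a convexity argument: d -> abs(ss - 2*d) is convex, so its maximum over the candidates [0]+dl is attained at min or max of the differences; B computes the optimal value from the two extremes and then searches for the first index attaining it.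
import Mathlib
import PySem

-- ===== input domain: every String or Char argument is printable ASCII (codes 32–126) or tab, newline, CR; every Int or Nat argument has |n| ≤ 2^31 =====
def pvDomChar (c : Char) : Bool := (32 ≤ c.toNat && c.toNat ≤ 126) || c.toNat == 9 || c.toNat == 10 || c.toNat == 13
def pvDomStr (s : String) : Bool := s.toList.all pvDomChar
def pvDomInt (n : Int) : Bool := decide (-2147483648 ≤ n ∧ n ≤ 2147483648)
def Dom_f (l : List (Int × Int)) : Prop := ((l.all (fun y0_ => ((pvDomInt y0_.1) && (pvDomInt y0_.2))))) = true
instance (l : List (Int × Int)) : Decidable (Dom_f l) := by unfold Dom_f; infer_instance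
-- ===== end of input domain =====

-- B replaces A's running best/index loop by a convexity argument: |ss - 2d| is maximized
-- at the min or max of the candidate differences, then one search finds the first index
-- attaining that value. Alternative algorithm, same cost and exact same value.

-- ===== PORT A =====
-- ab = lambda x: x if x>0 else -x
def pvAb (x : Int) : Int := if x > 0 then x else -x

def f (l : List (Int × Int)) : Int :=
  let k : Int := PySem.List.len l
  let dl : List Int := l.map (fun c => c.1 - c.2)
  let ss : Int := dl.sum
  -- for i in range(k): b = ab(ss - (dl[i]<<1)); if b > mb: mi = i+1; mb = b
  -- dl[i]<<1 = dl[i]*2 exactly on Int; index i is always in range, getD default unreachable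
  let r : Int × Int :=
    (PySem.List.pyRange 0 k 1).foldl
      (fun (s : Int × Int) i =>
        let b := pvAb (ss - (PySem.List.pyGetD dl i 0) * 2)
        if b > s.2 then (i + 1, b) else s)
      (0, pvAb ss)
  r.1

-- ===== PORT B =====
-- next(i for i, d in enumerate(ds) if abs(ss - (d << 1)) == v): first index whose value is v.
-- The [] case is unreachable (v is attained at min(ds) or max(ds), both members of ds).
def pvSearch (ds : List Int) (ss v j : Int) : Int :=
  match ds with
  | [] => 0
  | d :: t => if |ss - d * 2| = v then j else pvSearch t ss v (j + 1)

def f_alt (l : List (Int × Int)) : Int :=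
  let dl : List Int := l.map (fun c => c.1 - c.2)
  let ss : Int := dl.sum
  let ds : List Int := (0 : Int) :: dl
  -- ds is nonempty, so min(ds)/max(ds) never raise; getD defaults unreachable
  let v : Int := max (|ss - ((PySem.List.min? ds (fun y => y)).getD 0) * 2|)
                     (|ss - ((PySem.List.max? ds (fun y => y)).getD 0) * 2|)
  pvSearch ds ss v 0

-- ===== PRECONDITION & SPEC =====
def Spec_f (l : List (Int × Int)) (out : Int) : Prop := out = f_alt l
instance (l : List (Int × Int)) (out : Int) : Decidable (Spec_f l out) := by unfold Spec_f; infer_instance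

-- ===== CLAIM (what is proved, stated in full; the proofs are below) =====
def Claim_equal_f : Prop := ∀ (l : List (Int × Int)), Dom_f l → Spec_f l (f l)

-- ===== LEMMAS AND PROOFS =====

-- A's loop over the value list, position j = current python index i
def aloop (vs : List Int) (j : Int) (s : Int × Int) : Int × Int :=
  match vs with
  | [] => s
  | b :: bs => aloop bs (j + 1) (if b > s.2 then (j + 1, b) else s)

theorem pvAb_eq_abs (x : Int) : pvAb x = |x| := by
  unfold pvAb
  rcases lt_trichotomy x 0 with h | h | h
  · rw [if_neg (by omega), abs_of_neg h]
  · simp [h]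
  · rw [if_pos h, abs_of_pos h]

theorem aloop_spec (vs : List Int) (j mi mb : Int) :
    aloop vs j (mi, mb) =
      if vs.foldl max mb > mb
      then (j + 1 + (vs.idxOf (vs.foldl max mb) : Int), vs.foldl max mb)
      else (mi, mb) := by
  induction vs generalizing j mi mb with
  | nil => simp [aloop]
  | cons b bs ih =>
    simp only [aloop, List.foldl_cons]
    by_cases hb : b > mb
    · have hmax : max mb b = b := by omega
      rw [if_pos hb, hmax, ih]
      have hle : b ≤ bs.foldl max b := (PySem.List.le_foldl_max bs b).1
      by_cases h2 : bs.foldl max b > b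
      · rw [if_pos h2, if_pos (by omega)]
        have hne : bs.foldl max b ≠ b := by omega
        rw [List.idxOf_cons_ne _ (by omega)]
        simp only [Prod.mk.injEq, and_true]
        push_cast; ring
      · have heq : bs.foldl max b = b := by omega
        rw [if_neg h2, heq, if_pos hb, List.idxOf_cons_self]
        simp
    · have hmax : max mb b = mb := by omega
      rw [if_neg hb, hmax, ih]
      by_cases h2 : bs.foldl max mb > mb
      · rw [if_pos h2, if_pos h2]
        have : b ≠ bs.foldl max mb := by omega
        rw [List.idxOf_cons_ne _ (by omega)]
        simp only [Prod.mk.injEq, and_true]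
        push_cast; ring
      · rw [if_neg h2, if_neg h2]

theorem enumerate_foldl_eq_aloop (v : Int → Int) (dl : List Int) (j : Int) (s : Int × Int) :
    (PySem.List.enumerate dl j).foldl
        (fun (s : Int × Int) p =>
          if v p.2 > s.2 then (p.1 + 1, v p.2) else s) s
      = aloop (dl.map v) j s := by
  induction dl generalizing j s with
  | nil => simp [PySem.List.enumerate, aloop]
  | cons d ds ih => simp [PySem.List.enumerate, aloop, List.foldl_cons, ih]

-- B's search is "j + first index of w" whenever w occurs in the value list
theorem pvSearch_eq_idxOf (ds : List Int) (ss w j : Int)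
    (h : w ∈ ds.map (fun d => |ss - d * 2|)) :
    pvSearch ds ss w j = j + ((ds.map (fun d => |ss - d * 2|)).idxOf w : Int) := by
  induction ds generalizing j with
  | nil => simp at h
  | cons d t ih =>
    simp only [pvSearch, List.map_cons]
    by_cases hd : |ss - d * 2| = w
    · rw [if_pos hd, hd, List.idxOf_cons_self]; simp
    · rw [if_neg hd, List.idxOf_cons_ne _ hd,
        ih _ ((List.mem_cons.mp h).resolve_left (fun he => hd he.symm))]
      push_cast; ring

-- convexity: on mn ≤ d ≤ mx, |ss - 2d| ≤ max |ss - 2mn| |ss - 2mx|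
theorem conv_bound (ss mn mx d : Int) (h1 : mn ≤ d) (h2 : d ≤ mx) :
    |ss - d * 2| ≤ max (|ss - mn * 2|) (|ss - mx * 2|) := by
  have a1 := le_abs_self (ss - mn * 2)
  have a2 := le_abs_self (-(ss - mx * 2))
  rw [abs_neg] at a2
  rcases abs_sub_le_iff.mp (le_refl |ss - d * 2|) with _
  have : |ss - d * 2| = max (ss - d * 2) (-(ss - d * 2)) := by
    rcases le_total (ss - d * 2) 0 with h | h
    · rw [abs_of_nonpos h]; omega
    · rw [abs_of_nonneg h]; omega
  omega

theorem f_eq_f_alt (l : List (Int × Int)) : f l = f_alt l := by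
  unfold f f_alt
  simp only []
  set dl : List Int := l.map (fun c => c.1 - c.2) with hdl
  set ss : Int := dl.sum with hss
  set v : Int → Int := fun d => pvAb (ss - d * 2) with hv
  have hlen : PySem.List.len l = PySem.List.len dl := by
    simp [PySem.List.len_eq, hdl]
  -- A's fold over range+pyGetD is aloop over the tail value list
  have hA : (PySem.List.pyRange 0 (PySem.List.len l) 1).foldl
      (fun (s : Int × Int) i =>
        if v (PySem.List.pyGetD dl i 0) > s.2 then (i + 1, v (PySem.List.pyGetD dl i 0)) else s)
      (0, pvAb ss)
      = aloop (dl.map v) 0 (0, pvAb ss) := by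
    rw [hlen, ← enumerate_foldl_eq_aloop v dl 0, PySem.List.enumerate_eq_map_pyRange (d := 0),
      List.foldl_map]
  rw [hA, aloop_spec]
  -- the extremes of ds = 0 :: dl
  rw [PySem.List.min?_id_cons, PySem.List.max?_id_cons, Option.getD_some, Option.getD_some]
  set mn : Int := dl.foldl min 0 with hmn
  set mx : Int := dl.foldl max 0 with hmx
  set W : Int := max (|ss - mn * 2|) (|ss - mx * 2|) with hW
  set M : Int := (dl.map v).foldl max (pvAb ss) with hM
  have habs : ∀ d : Int, v d = |ss - d * 2| := fun d => pvAb_eq_abs _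
  -- W = M
  have hmn_le : mn ≤ 0 := (PySem.List.foldl_min_le dl 0).1
  have hmx_ge : 0 ≤ mx := (PySem.List.le_foldl_max dl 0).1
  have hMW : M = W := by
    have hWM : W ≤ M := by
      -- mn and mx are 0 or members of dl, so their values occur in the fold
      have hvle : ∀ d : Int, d = 0 ∨ d ∈ dl → v d ≤ M := by
        rintro d (rfl | hd)
        · have h0 : v 0 = pvAb ss := by simp [hv]
          rw [h0]; exact (PySem.List.le_foldl_max (dl.map v) (pvAb ss)).1
        · exact (PySem.List.le_foldl_max (dl.map v) (pvAb ss)).2 _ (List.mem_map_of_mem hd)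
      have h1 : |ss - mn * 2| ≤ M := by
        rw [← habs]
        rcases PySem.List.foldl_min_mem dl 0 with h | h
        · exact hvle mn (Or.inl h)
        · exact hvle mn (Or.inr h)
      have h2 : |ss - mx * 2| ≤ M := by
        rw [← habs]
        rcases PySem.List.foldl_max_mem dl 0 with h | h
        · exact hvle mx (Or.inl h)
        · exact hvle mx (Or.inr h)
      omega
    have hMW' : M ≤ W := by
      have hbW : ∀ d, mn ≤ d → d ≤ mx → v d ≤ W := by
        intro d h1 h2; rw [habs]; exact conv_bound ss mn mx d h1 h2
      rcases PySem.List.foldl_max_mem (dl.map v) (pvAb ss) with h | h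
      · rw [← hM] at h; rw [h]
        have h0 : pvAb ss = v 0 := by simp [hv]
        rw [h0]; exact hbW 0 hmn_le hmx_ge
      · rw [← hM] at h
        obtain ⟨d, hd, hvd⟩ := List.mem_map.mp h
        rw [← hvd]
        exact hbW d ((PySem.List.foldl_min_le dl 0).2 _ hd) ((PySem.List.le_foldl_max dl 0).2 _ hd)
    omega
  -- W occurs in the value list of ds = 0 :: dl
  have hVmap : ((0 : Int) :: dl).map (fun d => |ss - d * 2|) = pvAb ss :: dl.map v := by
    simp [hv, pvAb_eq_abs]
  have hWmem : W ∈ ((0 : Int) :: dl).map (fun d => |ss - d * 2|) := by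
    rw [hVmap, ← hMW]
    rcases PySem.List.foldl_max_mem (dl.map v) (pvAb ss) with h | h
    · rw [← hM] at h; rw [h]; exact List.mem_cons_self
    · rw [← hM] at h; exact List.mem_cons_of_mem _ h
  rw [pvSearch_eq_idxOf _ _ _ _ hWmem, hVmap, ← hMW]
  have hle : pvAb ss ≤ M := (PySem.List.le_foldl_max (dl.map v) (pvAb ss)).1
  by_cases h : M > pvAb ss
  · rw [if_pos h, List.idxOf_cons_ne _ (by omega)]
    simp only []
    push_cast; ring
  · rw [if_neg h]
    have : M = pvAb ss := by omega
    rw [this, List.idxOf_cons_self]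
    simp

-- ===== VERDICT (by name: the statement is the Claim_ definition above) =====
theorem f_spec : Claim_equal_f := by
  intro l _
  unfold Spec_f
  exact f_eq_f_alt l
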